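-- pv_equiv track=rewrite | github.com/cutekamji/algorithm-study | programmers_12930.py | solution
-- ===== SOURCE A (Python) =====
-- def solution(s):
--     # 우선 입력받은 문자 모두 소문자로 변환
--     s = s.lower()
--     # 공백 기준으로 문자열 분리
--     s_li = s.split(' ')
--     # 추후 대문자 변환한 문자열 입력받을 리스트 생성
--     answer_part = []
--     # 공백 기준 문자열 전용 반복문
--     for i in range(len(s_li)):
--         # 각 문자열 내에서 대문자 변환 진행한 알파벳 입력받을 리스트 생성
--         s_li_2 = []
--         # 각 문자열 내 알파벳 위치 전용 반복문
--         for j in range(len(s_li[i])):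
--             # 각 리스트 원소 중 홀수번째인 경우 대문자로 변환
--             # upper 함수를 거쳐 변환된 문자열을 리스트 원소로 할당하고자 했으나 불가능하여 기존에 생성했던 빈 리스트에 append
--             if j%2==0:
--                 s_li_2.append(s_li[i][j].upper())
--             else:
--                 s_li_2.append(s_li[i][j])
--         # 각 문자열을 위한 변환된 알파벳 리스트는 공백 없이 조인
--         answer_part.append(''.join(s_li_2))
--     # 리스트 원소 다시 공백 추가하여 합치기
--     answer = ' '.join(answer_part)
--     return answer
-- ===== SOURCE B (Python) =====
-- def solution(s):
--     # single pass: counter resets to 0 at each space, toggles case by parity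
--     out = []
--     idx = 0
--     for c in s.lower():
--         if c == ' ':
--             out.append(c)
--             idx = 0
--         else:
--             out.append(c.upper() if idx % 2 == 0 else c)
--             idx += 1
--     return ''.join(out)
-- ===== Notes on version B (the rewrite author's own statement) =====
-- stated objective: simpler
-- what changed: Replaces split-on-space plus nested per-word index loops and two join steps with a single pass over the lowered string that keeps one counter reset to 0 on each space.
import Mathlib
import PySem

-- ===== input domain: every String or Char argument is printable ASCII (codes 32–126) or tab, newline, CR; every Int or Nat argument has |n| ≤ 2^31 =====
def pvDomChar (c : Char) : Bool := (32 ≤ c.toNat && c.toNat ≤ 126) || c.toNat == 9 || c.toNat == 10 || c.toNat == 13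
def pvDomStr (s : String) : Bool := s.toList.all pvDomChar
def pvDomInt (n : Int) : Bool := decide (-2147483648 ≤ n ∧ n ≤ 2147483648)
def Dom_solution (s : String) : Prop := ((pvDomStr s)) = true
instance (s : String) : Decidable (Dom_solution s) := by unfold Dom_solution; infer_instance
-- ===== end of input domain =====

-- B replaces A's split-on-space + nested per-word loops + two joins by one pass with a counter
-- that resets on spaces (objective: simpler; same return value everywhere).

-- ===== PORT A =====
-- inner loop: for j in range(len(w)): append w[j].upper() if j%2==0 else w[j]
def pvWordA (w : List Char) : List (List Char) :=
  (PySem.List.pyRange 0 (w.length : Int) 1).foldl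
    (fun acc j =>
      acc ++ [if PySem.Int.mod j 2 = 0 then PySem.Chars.upper [PySem.List.pyGetD w j ' ']
              else [PySem.List.pyGetD w j ' ']]) []

def solution (s : String) : String :=
  let t := PySem.Chars.lower s.toList
  let s_li := PySem.Chars.splitOn t [' ']
  let answer_part := (PySem.List.pyRange 0 (s_li.length : Int) 1).foldl
      (fun acc i => acc ++ [PySem.Chars.join [] (pvWordA (PySem.List.pyGetD s_li i []))]) []
  String.ofList (PySem.Chars.join [' '] answer_part)

-- ===== PORT B =====
def solution_alt (s : String) : String :=
  let r := (PySem.Chars.lower s.toList).foldl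
    (fun (st : List Char × Int) c =>
      if c = ' ' then (st.1 ++ [c], 0)
      else (st.1 ++ [if PySem.Int.mod st.2 2 = 0 then PySem.Chars.upperChar c else c], st.2 + 1))
    ([], 0)
  String.ofList r.1

-- ===== PRECONDITION & SPEC =====
def Spec_solution (s : String) (out : String) : Prop := out = solution_alt s
instance (s : String) (out : String) : Decidable (Spec_solution s out) := by unfold Spec_solution; infer_instance

-- ===== CLAIM (what is proved, stated in full; the proofs are below) =====
def Claim_equal_solution : Prop := ∀ (s : String), Dom_solution s → Spec_solution s (solution s)

-- ===== LEMMAS AND PROOFS =====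

-- the single-pass transform: counter k, reset on space
def pvOut : List Char → Int → List Char
  | [], _ => []
  | c :: r, k =>
      if c = ' ' then ' ' :: pvOut r 0
      else (if PySem.Int.mod k 2 = 0 then PySem.Chars.upperChar c else c) :: pvOut r (k + 1)

-- one word processed from counter k (no spaces expected inside)
def pvAltW : List Char → Int → List Char
  | [], _ => []
  | c :: r, k => (if PySem.Int.mod k 2 = 0 then PySem.Chars.upperChar c else c) :: pvAltW r (k + 1)

-- Python's s.split(' ') as a structural recursion (cur = current word so far)
def pvSplit : List Char → List Char → List (List Char)
  | cur, [] => [cur]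
  | cur, c :: r => if c = ' ' then cur :: pvSplit [] r else pvSplit (cur ++ [c]) r

theorem pvSplit_ne_nil (cur t : List Char) : pvSplit cur t ≠ [] := by
  induction t generalizing cur with
  | nil => simp [pvSplit]
  | cons c r ih => simp only [pvSplit]; split_ifs <;> simp [ih]

theorem pvGo_eq (l : List Char) : ∀ (fuel : Nat) (cur : List Char) (acc : List (List Char)),
    l.length ≤ fuel →
    PySem.Chars.splitOn.go [' '] fuel l cur acc = acc.reverse ++ pvSplit cur.reverse l := by
  induction l with
  | nil =>
      intro fuel cur acc _
      cases fuel <;> simp [PySem.Chars.splitOn.go, pvSplit]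
  | cons c rest ih =>
      intro fuel cur acc hle
      cases fuel with
      | zero => simp at hle
      | succ fuel =>
        by_cases hc : c = ' '
        · subst hc
          simp only [PySem.Chars.splitOn.go, List.isPrefixOf, BEq.rfl, Bool.true_and,
            if_true, List.length_singleton, List.drop_one,
            List.tail_cons]
          rw [ih fuel [] (cur.reverse :: acc) (by simpa using Nat.le_of_succ_le_succ hle)]
          simp [pvSplit]
        · have hpre : ([' '].isPrefixOf (c :: rest)) = false := by
            simp [List.isPrefixOf]
            exact fun h => hc h.symm
          simp only [PySem.Chars.splitOn.go, hpre, if_false, Bool.false_eq_true]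
          rw [ih fuel (c :: cur) acc (by simpa using Nat.le_of_succ_le_succ hle)]
          simp [pvSplit, hc]

theorem pvSplitOn_eq (t : List Char) : PySem.Chars.splitOn t [' '] = pvSplit [] t := by
  unfold PySem.Chars.splitOn
  rw [pvGo_eq t (t.length + 1) [] [] (Nat.le_succ _)]
  simp

theorem pvAltW_append (u : List Char) (c : Char) : ∀ (k : Int),
    pvAltW (u ++ [c]) k =
      pvAltW u k ++ [if PySem.Int.mod (k + u.length) 2 = 0 then PySem.Chars.upperChar c else c] := by
  induction u with
  | nil => intro k; simp [pvAltW]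
  | cons d r ih =>
      intro k
      simp only [List.cons_append, pvAltW, ih (k + 1), List.length_cons]
      have : k + 1 + (r.length : Int) = k + ((r.length : Int) + 1) := by ring
      rw [this]
      push_cast
      ring_nf

theorem pvInner_eq (r : List Char) : ∀ (u : List Char) (acc : List (List Char)),
    (PySem.List.pyRange (u.length : Int) ((u.length : Int) + (r.length : Int)) 1).foldl
      (fun acc j =>
        acc ++ [if PySem.Int.mod j 2 = 0 then PySem.Chars.upper [PySem.List.pyGetD (u ++ r) j ' ']
                else [PySem.List.pyGetD (u ++ r) j ' ']]) acc
    = acc ++ (pvAltW r (u.length : Int)).map (fun c => [c]) := by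
  induction r with
  | nil =>
      intro u acc
      rw [PySem.List.pyRange_one_eq_nil (by simp)]
      simp [pvAltW]
  | cons c rr ih =>
      intro u acc
      have hlen : (((u ++ [c]).length : Int)) = ((u.length : Int) + 1) := by simp
      have hbound : ((u.length : Int) + ((c :: rr).length : Int))
          = (((u ++ [c]).length : Int) + (rr.length : Int)) := by simp; omega
      rw [PySem.List.pyRange_one_cons (by push_cast [List.length_cons]; omega)]
      simp only [List.foldl_cons]
      have hget : PySem.List.pyGetD (u ++ c :: rr) (u.length : Int) ' ' = c := by
        simp [PySem.List.pyGetD_natCast, List.getD_eq_getElem?_getD]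
      rw [hget, hbound, show ((u.length : Int) + 1) = (((u ++ [c]).length : Int)) from hlen.symm,
          show u ++ c :: rr = (u ++ [c]) ++ rr from by simp, ih (u ++ [c])]
      simp only [pvAltW, List.map_cons, hlen]
      split_ifs with h <;> simp [PySem.Chars.upper, List.append_assoc]

theorem pvWordA_eq (w : List Char) : PySem.Chars.join [] (pvWordA w) = pvAltW w 0 := by
  have h := pvInner_eq w [] []
  simp only [List.length_nil, Int.natCast_zero, zero_add, List.nil_append] at h
  unfold pvWordA
  rw [h]
  simp [PySem.Chars.join_nil_singletons]

theorem pvJoin_split (t : List Char) : ∀ (cur : List Char),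
    PySem.Chars.join [' '] ((pvSplit cur t).map (fun w => pvAltW w 0))
      = pvAltW cur 0 ++ pvOut t (cur.length : Int) := by
  induction t with
  | nil => intro cur; simp [pvSplit, pvOut, PySem.Chars.join_singleton]
  | cons c r ih =>
      intro cur
      by_cases hc : c = ' '
      · subst hc
        rw [show pvSplit cur (' ' :: r) = cur :: pvSplit [] r from by simp [pvSplit]]
        obtain ⟨h, tl, heq⟩ : ∃ h tl, pvSplit ([] : List Char) r = h :: tl := by
          cases hsp : pvSplit ([] : List Char) r with
          | nil => exact absurd hsp (pvSplit_ne_nil _ _)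
          | cons h tl => exact ⟨h, tl, rfl⟩
        have hih := ih ([] : List Char)
        rw [heq] at hih ⊢
        simp only [List.map_cons] at hih
        rw [List.map_cons, List.map_cons, PySem.Chars.join_cons_cons, hih]
        simp [pvAltW, pvOut]
      · simp only [pvSplit, hc, if_false, pvOut]
        rw [ih (cur ++ [c])]
        rw [pvAltW_append cur c 0]
        simp only [zero_add, List.length_append, List.length_cons]
        push_cast
        simp [List.append_assoc]

theorem pvB_fold (t : List Char) : ∀ (acc : List Char) (k : Int),
    (t.foldl
      (fun (st : List Char × Int) c =>
        if c = ' ' then (st.1 ++ [c], 0)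
        else (st.1 ++ [if PySem.Int.mod st.2 2 = 0 then PySem.Chars.upperChar c else c], st.2 + 1))
      (acc, k)).1 = acc ++ pvOut t k := by
  induction t with
  | nil => intro acc k; simp [pvOut]
  | cons c r ih =>
      intro acc k
      by_cases hc : c = ' '
      · subst hc; simp only [List.foldl_cons, if_true, pvOut, ih]; simp
      · simp only [List.foldl_cons, hc, if_false, pvOut, ih]
        simp

-- ===== VERDICT (by name: the statement is the Claim_ definition above) =====
theorem solution_spec : Claim_equal_solution := by
  unfold Claim_equal_solution
  intro s _
  simp only [Spec_solution, solution, solution_alt]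
  rw [PySem.List.foldl_pyRange_zero_pyGetD' (PySem.Chars.splitOn (PySem.Chars.lower s.toList) [' ']) []
        (fun acc w => acc ++ [PySem.Chars.join [] (pvWordA w)]) []]
  rw [PySem.List.foldl_append_singleton_eq_map (fun w => PySem.Chars.join [] (pvWordA w))]
  rw [pvSplitOn_eq]
  have hmap : (pvSplit [] (PySem.Chars.lower s.toList)).map (fun w => PySem.Chars.join [] (pvWordA w))
      = (pvSplit [] (PySem.Chars.lower s.toList)).map (fun w => pvAltW w 0) := by
    apply List.map_congr_left; intro w _; exact pvWordA_eq w
  rw [List.nil_append, hmap, pvJoin_split (PySem.Chars.lower s.toList) []]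
  rw [pvB_fold (PySem.Chars.lower s.toList) [] 0]
  simp [pvAltW]
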